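-- pv_equiv track=rewrite | github.com/ajaymovva/mission-rnd-python-course | PythonCourse/unit7_assignment_01.py | sortinginlists
-- ===== SOURCE A (Python) =====
-- def sortinginlists(ans):
--     for i in ans:
--         i.sort(key=lambda x:x.lower())
--     temp = []
--     ans1 = []
--     p = len(ans[0])
--     for i in range(p, 0, -1):
--         for j in ans:
--             if (len(j) == i):
--                 temp.append(j)
--         temp.sort(key=lambda x: x[0].lower())
--         for p in temp:
--             ans1.append(p)
--         temp = []
--     return ans1
-- ===== SOURCE B (Python) =====
-- def sortinginlists(ans):
--     # One-pass bucketing by length instead of scanning the whole list once per length.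
--     # Unlike A, does not mutate the inner lists in place (return value is identical).
--     buckets = {}
--     for lst in ans:
--         s = sorted(lst, key=str.lower)
--         buckets[len(s)] = buckets.get(len(s), []) + [s]
--     out = []
--     for length in range(len(ans[0]), 0, -1):
--         out += sorted(buckets.get(length, []), key=lambda g: g[0].lower())
--     return out
-- ===== Notes on version B (the rewrite author's own statement) =====
-- stated objective: alternative
-- what changed: B builds a length-keyed bucket dict of the sorted inner lists in one pass, then walks lengths len(ans[0])..1 emitting each bucket sorted by first element, instead of A's rescan of the whole list for every length; B also does not mutate the inner lists in place.
import Mathlib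
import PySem

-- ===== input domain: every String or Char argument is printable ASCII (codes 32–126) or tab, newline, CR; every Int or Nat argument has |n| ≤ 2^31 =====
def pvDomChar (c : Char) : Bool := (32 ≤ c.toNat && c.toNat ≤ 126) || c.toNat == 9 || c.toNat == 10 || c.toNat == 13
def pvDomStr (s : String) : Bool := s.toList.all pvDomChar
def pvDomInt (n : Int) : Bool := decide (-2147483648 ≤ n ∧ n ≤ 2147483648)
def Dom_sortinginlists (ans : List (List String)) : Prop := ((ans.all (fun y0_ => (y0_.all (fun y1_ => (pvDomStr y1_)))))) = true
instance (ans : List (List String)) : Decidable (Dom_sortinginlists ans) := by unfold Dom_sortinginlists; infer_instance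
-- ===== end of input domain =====

-- B buckets the inner lists by length in one pass instead of rescanning the whole list for every length
-- (objective: alternative); equivalence is about the RETURN value only — A additionally
-- sorts the inner lists of `ans` in place, B does not mutate its argument.

-- ===== PORT A =====
def sortinginlists (ans : List (List String)) : List (List String) :=
  -- 'for i in ans: i.sort(key=lambda x: x.lower())' mutates in place; modelled as the new list ans2
  let ans2 := ans.map (fun i => PySem.List.sorted i (fun x => PySem.Str.lower x))
  -- p = len(ans[0]): IndexError on ans = [], excluded by Pre_; pyGetD's default is never used there
  let p : Int := ((PySem.List.pyGetD ans2 0 []).length : Int)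
  (PySem.List.pyRange p 0 (-1)).foldl (fun ans1 i =>
      let temp := ans2.foldl (fun temp j => if ((j.length : Int) == i) then temp ++ [j] else temp) []
      -- x[0].lower(): exact, every element of temp has length i ≥ 1 so headD's default is never used
      let temp2 := PySem.List.sorted temp (fun x => PySem.Str.lower (x.headD ""))
      ans1 ++ temp2) []

-- ===== PORT B =====
def sortinginlists_alt (ans : List (List String)) : List (List String) :=
  let buckets := ans.foldl (fun d lst =>
      let s := PySem.List.sorted lst (fun x => PySem.Str.lower x)
      d.insert (s.length : Int) (d.getD (s.length : Int) [] ++ [s]))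
    (PySem.Dict.empty : PySem.Dict Int (List (List String)))
  -- len(ans[0]): raises on ans = [], excluded by Pre_
  let p : Int := ((PySem.List.pyGetD ans 0 []).length : Int)
  (PySem.List.pyRange p 0 (-1)).foldl (fun out i =>
      -- g[0].lower(): exact, fetched buckets hold lists of length i ≥ 1
      out ++ PySem.List.sorted (buckets.getD i []) (fun g => PySem.Str.lower (g.headD ""))) []

-- ===== PRECONDITION & SPEC =====
-- Pre_ excludes only the empty outer list, on which Python A raises IndexError at ans[0] (B raises there too).
def Pre_sortinginlists (ans : List (List String)) : Prop := ans ≠ []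
instance (ans : List (List String)) : Decidable (Pre_sortinginlists ans) := by unfold Pre_sortinginlists; infer_instance
def pvWitness_sortinginlists : List (List String) := [["b", "A"], ["c"]]

def Spec_sortinginlists (ans : List (List String)) (out : List (List String)) : Prop := out = sortinginlists_alt ans
instance (ans : List (List String)) (out : List (List String)) : Decidable (Spec_sortinginlists ans out) := by unfold Spec_sortinginlists; infer_instance

-- ===== CLAIM (what is proved, stated in full; the proofs are below) =====
def Claim_equal_sortinginlists : Prop := ∀ (ans : List (List String)), Dom_sortinginlists ans → Pre_sortinginlists ans → Spec_sortinginlists ans (sortinginlists ans)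

-- ===== LEMMAS AND PROOFS =====

-- B's bucket dict looked up at k holds exactly the (sorted) inner lists of length k, in order.
theorem bucket_getD (l : List (List String)) (d : PySem.Dict Int (List (List String))) (k : Int) :
    (l.foldl (fun d lst =>
        d.insert (lst.length : Int)
          (d.getD (lst.length : Int) [] ++ [PySem.List.sorted lst (fun x => PySem.Str.lower x)])) d).getD k []
      = d.getD k []
        ++ (l.map (fun i => PySem.List.sorted i (fun x => PySem.Str.lower x))).filter
             (fun j => ((j.length : Int) == k)) := by
  induction l generalizing d with
  | nil => simp
  | cons a l ih =>
    simp only [List.foldl_cons, List.map_cons, List.filter_cons, ih, PySem.List.length_sorted]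
    by_cases hk : (a.length : Int) = k
    · subst hk; simp
    · simp [PySem.Dict.getD_insert, hk, Ne.symm hk]

theorem sortinginlists_eq_cons (h : List String) (t : List (List String)) :
    sortinginlists (h :: t) = sortinginlists_alt (h :: t) := by
  unfold sortinginlists sortinginlists_alt
  have h0A : PySem.List.pyGetD ((h::t).map (fun i => PySem.List.sorted i (fun x => PySem.Str.lower x))) 0 [] = PySem.List.sorted h (fun x => PySem.Str.lower x) := by
    simp [PySem.List.pyGetD, PySem.List.pyGet?, PySem.List.pyIdx?]
  have h0B : PySem.List.pyGetD (h::t) 0 ([] : List String) = h := by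
    simp [PySem.List.pyGetD, PySem.List.pyGet?, PySem.List.pyIdx?]
  simp only [h0A, h0B, PySem.List.length_sorted]
  apply PySem.List.foldl_congr_mem
  intro acc i _
  congr 1
  rw [bucket_getD]
  simp only [PySem.Dict.getD_empty, List.nil_append, List.map_cons]
  congr 1
  rw [PySem.List.foldl_append_if_eq_filter]
  simp

-- ===== VERDICT (by name: the statement is the Claim_ definition above) =====
theorem sortinginlists_spec : Claim_equal_sortinginlists := by
  intro ans _ hpre
  unfold Spec_sortinginlists
  match ans, hpre with
  | h :: t, _ => exact sortinginlists_eq_cons h t
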